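-- pv_equiv track=rewrite | github.com/Parsarahimi8/jira_load_balancer | round_robin_jira.py | next_assignees
-- ===== SOURCE A (Python) =====
-- from collections import deque
--
-- def next_assignees(team_list, skip_set, start_idx, n):
--     if not team_list:
--         return [], start_idx
--     rr = deque(team_list)
--     rr.rotate(-start_idx)
--     out, steps = [], 0
--     safeguard = max(10000, 5 * (len(team_list) + n))
--     while len(out) < n and team_list:
--         cand = rr[0]
--         if cand not in skip_set:
--             out.append(cand)
--         rr.rotate(-1)
--         steps += 1
--         if steps > safeguard:
--             raise RuntimeError("Too many steps in RR loop. Check team/skip lists.")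
--     new_idx = (start_idx + steps) % len(team_list) if team_list else 0
--     return out, new_idx
-- ===== SOURCE B (Python) =====
-- def next_assignees(team_list, skip_set, start_idx, n):
--     L = len(team_list)
--     if L == 0:
--         return [], start_idx
--     k = start_idx % L
--     if n <= 0:
--         return [], k
--     rot = team_list[k:] + team_list[:k]
--     pairs = [(i, m) for i, m in enumerate(rot) if m not in skip_set]
--     v = len(pairs)
--     if v == 0:
--         return [], k
--     q, r = divmod(n - 1, v)
--     valid = [m for _, m in pairs]
--     out = valid * q + valid[:r + 1]
--     steps = q * L + pairs[r][0] + 1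
--     return out, (k + steps) % L
-- ===== Notes on version B (the rewrite author's own statement) =====
-- stated objective: faster
-- what changed: B replaces A's one-step-at-a-time deque rotation loop by a single pass that lists the valid (non-skipped) members of the rotated team and then computes the n picks and the step count in closed form (full rounds via divmod plus a prefix).
import Mathlib
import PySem

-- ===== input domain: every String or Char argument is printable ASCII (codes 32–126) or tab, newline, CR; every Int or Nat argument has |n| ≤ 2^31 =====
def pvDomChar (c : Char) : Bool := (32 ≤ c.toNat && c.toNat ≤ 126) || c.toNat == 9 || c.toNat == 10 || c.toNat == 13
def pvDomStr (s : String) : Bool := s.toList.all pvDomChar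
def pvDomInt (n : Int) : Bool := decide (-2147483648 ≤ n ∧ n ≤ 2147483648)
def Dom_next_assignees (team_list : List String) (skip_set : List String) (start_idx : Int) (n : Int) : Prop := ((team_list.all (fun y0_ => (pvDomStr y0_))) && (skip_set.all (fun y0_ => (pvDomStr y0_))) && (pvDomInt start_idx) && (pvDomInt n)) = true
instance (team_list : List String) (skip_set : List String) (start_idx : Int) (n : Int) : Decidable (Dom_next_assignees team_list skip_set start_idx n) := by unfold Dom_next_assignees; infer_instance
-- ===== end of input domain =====

-- B replaces A's step-by-step deque rotation loop by cycle arithmetic over the valid members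
-- of the rotated list (full rounds + a prefix), computing picks and step count directly.


-- ===== PORT A =====
-- the while loop: state (rr, out, steps); deque.rotate(-1) moves the head to the tail;
-- `none` = the RuntimeError raise (steps > safeguard) / unreachable cases (fuel 0, empty deque)
def pvLoopA (skip_set : List String) (n safeguard : Int) :
    Nat → List String → List String → Int → Option (List String × Int)
  | fuel, rr, out, steps =>
    if (out.length : Int) < n then
      match fuel, rr with
      | 0, _ => none
      | _ + 1, [] => none
      | f + 1, cand :: t =>
        let out' := if !(skip_set.contains cand) then out ++ [cand] else out
        if steps + 1 > safeguard then none
        else pvLoopA skip_set n safeguard f (t ++ [cand]) out' (steps + 1)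
    else some (out, steps)

def next_assignees (team_list : List String) (skip_set : List String) (start_idx : Int) (n : Int) : List String × Int :=
  if team_list = [] then ([], start_idx)
  else
    let L : Int := team_list.length
    -- deque(team_list); rotate(-start_idx): exact net left-rotation by start_idx mod L
    let k := (PySem.Int.mod start_idx L).toNat
    let rr := team_list.drop k ++ team_list.take k
    let safeguard := max 10000 (5 * (L + n))
    -- fuel (safeguard+1) covers every iteration the loop can perform before returning or raising
    match pvLoopA skip_set n safeguard (safeguard + 1).toNat rr [] 0 with
    | some (out, steps) => (out, PySem.Int.mod (start_idx + steps) L)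
    | none => ([], start_idx)  -- RuntimeError: excluded by Pre_

-- ===== PORT B =====
def next_assignees_alt (team_list : List String) (skip_set : List String) (start_idx : Int) (n : Int) : List String × Int :=
  let L : Int := team_list.length
  if L = 0 then ([], start_idx)
  else
    let k := PySem.Int.mod start_idx L
    if n ≤ 0 then ([], k)
    else
      let rot := team_list.drop k.toNat ++ team_list.take k.toNat
      let pairs := (PySem.List.enumerate rot 0).filter (fun p => !(skip_set.contains p.2))
      let v : Int := pairs.length
      if v = 0 then ([], k)
      else
        let q := PySem.Int.floordiv (n - 1) v
        let r := PySem.Int.mod (n - 1) v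
        let valid := pairs.map (fun p => p.2)
        let out := (List.replicate q.toNat valid).flatten ++ valid.take (r.toNat + 1)
        -- pairs[r]: r is in range (0 ≤ r < v), so the default of pyGetD is never used
        let steps := q * L + (PySem.List.pyGetD pairs r (0, "")).1 + 1
        (out, PySem.Int.mod (k + steps) L)

-- ===== PRECONDITION & SPEC =====
-- number of team members not in skip_set
def pvValidCount (team_list : List String) (skip_set : List String) : Nat :=
  (team_list.filter (fun m => !(skip_set.contains m))).length

-- total number of loop steps A needs (meaningful when team_list ≠ [], n > 0, pvValidCount > 0)
def pvStepsB (team_list : List String) (skip_set : List String) (start_idx : Int) (n : Int) : Int :=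
  let L : Int := team_list.length
  let k := (PySem.Int.mod start_idx L).toNat
  let rot := team_list.drop k ++ team_list.take k
  let pairs := (PySem.List.enumerate rot 0).filter (fun p => !(skip_set.contains p.2))
  let v : Int := pairs.length
  PySem.Int.floordiv (n - 1) v * L + (PySem.List.pyGetD pairs (PySem.Int.mod (n - 1) v) (0, "")).1 + 1

-- A returns unless its loop would run forever (no valid member) or overruns the safeguard,
-- in which case it raises RuntimeError; Pre_ is exactly the returning inputs.
def Pre_next_assignees (team_list : List String) (skip_set : List String) (start_idx : Int) (n : Int) : Prop :=
  team_list = [] ∨ n ≤ 0 ∨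
    (0 < pvValidCount team_list skip_set ∧
     pvStepsB team_list skip_set start_idx n ≤ max 10000 (5 * ((team_list.length : Int) + n)))
instance (team_list : List String) (skip_set : List String) (start_idx : Int) (n : Int) : Decidable (Pre_next_assignees team_list skip_set start_idx n) := by unfold Pre_next_assignees; infer_instance

def pvWitness_next_assignees : List String × List String × Int × Int := (["alice", "bob", "carol"], ["bob"], 1, 3)

def Spec_next_assignees (team_list : List String) (skip_set : List String) (start_idx : Int) (n : Int) (out : List String × Int) : Prop := out = next_assignees_alt team_list skip_set start_idx n
instance (team_list : List String) (skip_set : List String) (start_idx : Int) (n : Int) (out : List String × Int) : Decidable (Spec_next_assignees team_list skip_set start_idx n out) := by unfold Spec_next_assignees; infer_instance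

-- ===== CLAIM (what is proved, stated in full; the proofs are below) =====
def Claim_equal_next_assignees : Prop := ∀ (team_list : List String) (skip_set : List String) (start_idx : Int) (n : Int), Dom_next_assignees team_list skip_set start_idx n → Pre_next_assignees team_list skip_set start_idx n → Spec_next_assignees team_list skip_set start_idx n (next_assignees team_list skip_set start_idx n)
-- ===== LEMMAS AND PROOFS =====

-- first s elements of the cyclic stream of rr (matching the loop's rotate-by-one traversal)
def pvCyc : List String → Nat → List String
  | _, 0 => []
  | [], _ + 1 => []
  | h :: t, s + 1 => h :: pvCyc (t ++ [h]) s

theorem pvCyc_append (a : List String) : ∀ (b : List String) (s : Nat),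
    pvCyc (a ++ b) (a.length + s) = a ++ pvCyc (b ++ a) s := by
  induction a with
  | nil => intro b s; simp
  | cons h t ih =>
    intro b s
    have : (h :: t).length + s = (t.length + s) + 1 := by simp; omega
    rw [this]
    show h :: pvCyc ((t ++ b) ++ [h]) (t.length + s) = _
    rw [List.append_assoc, ih (b ++ [h]) s]
    simp

theorem pvCyc_full (rr : List String) (s : Nat) :
    pvCyc rr (rr.length + s) = rr ++ pvCyc rr s := by
  have h := pvCyc_append rr [] s
  simpa using h

theorem pvCyc_take : ∀ (t : Nat) (rr : List String), t ≤ rr.length → pvCyc rr t = rr.take t := by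
  intro t
  induction t with
  | zero => intro rr _; simp [pvCyc]
  | succ t ih =>
    intro rr ht
    match rr with
    | [] => simp at ht
    | h :: tl =>
      show h :: pvCyc (tl ++ [h]) t = h :: tl.take t
      simp only [List.length_cons] at ht
      have h1 : t ≤ (tl ++ [h]).length := by simp only [List.length_append, List.length_cons, List.length_nil]; omega
      rw [ih _ h1, List.take_append_of_le_length (by omega)]

theorem pvCyc_cycles (rr : List String) : ∀ (a b : Nat), b ≤ rr.length →
    pvCyc rr (a * rr.length + b) = (List.replicate a rr).flatten ++ rr.take b := by
  intro a
  induction a with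
  | zero => intro b hb; simpa using pvCyc_take b rr hb
  | succ a ih =>
    intro b hb
    have : (a + 1) * rr.length + b = rr.length + (a * rr.length + b) := by ring
    rw [this, pvCyc_full, ih b hb]
    simp [List.replicate_succ]

theorem pvLoop_spec (skip_set : List String) (n safeguard : Int) :
    ∀ (s fuel : Nat) (rr out : List String) (steps : Int),
    rr ≠ [] → s ≤ fuel → steps + s ≤ safeguard →
    ((out.length : Int) + ((pvCyc rr s).filter (fun m => !(skip_set.contains m))).length = n) →
    (∀ t : Nat, t < s → (out.length : Int) + ((pvCyc rr t).filter (fun m => !(skip_set.contains m))).length < n) →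
    pvLoopA skip_set n safeguard fuel rr out steps
      = some (out ++ (pvCyc rr s).filter (fun m => !(skip_set.contains m)), steps + s) := by
  intro s
  induction s with
  | zero =>
    intro fuel rr out steps _ _ _ hEq _
    rw [pvLoopA.eq_def]
    simp only [pvCyc, List.filter_nil, List.length_nil, Nat.cast_zero, add_zero] at hEq ⊢
    rw [if_neg (by omega)]
    simp
  | succ s ih =>
    intro fuel rr out steps hrr hfuel hsg hEq hmin
    have hlt : (out.length : Int) < n := by
      have h0 := hmin 0 (Nat.succ_pos s)
      simpa [pvCyc] using h0
    match fuel, rr with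
    | 0, _ => omega
    | f + 1, [] => exact absurd rfl hrr
    | f + 1, cand :: t =>
      have hnr : ¬ (steps + 1 > safeguard) := by push_cast at hsg; omega
      show (if (out.length : Int) < n then
              (if steps + 1 > safeguard then none
               else pvLoopA skip_set n safeguard f (t ++ [cand])
                 (if !(skip_set.contains cand) then out ++ [cand] else out) (steps + 1))
            else some (out, steps)) = _
      rw [if_pos hlt, if_neg hnr]
      have hcyc : pvCyc (cand :: t) (s + 1) = cand :: pvCyc (t ++ [cand]) s := rfl
      by_cases hP : skip_set.contains cand
      · -- cand skipped: out unchanged, element filtered away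
        have hfc : (cand :: pvCyc (t ++ [cand]) s).filter (fun m => !(skip_set.contains m))
            = (pvCyc (t ++ [cand]) s).filter (fun m => !(skip_set.contains m)) := by
          simp only [List.filter_cons, hP, Bool.not_true, Bool.false_eq_true, if_false]
        have hrw := ih f (t ++ [cand]) out (steps + 1) (by simp)
          (by omega) (by push_cast at hsg ⊢; omega)
          (by rw [hcyc, hfc] at hEq; exact hEq)
          (fun u hu => by
            have hm := hmin (u + 1) (by omega)
            have hfc' : (cand :: pvCyc (t ++ [cand]) u).filter (fun m => !(skip_set.contains m))
                = (pvCyc (t ++ [cand]) u).filter (fun m => !(skip_set.contains m)) := by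
              simp only [List.filter_cons, hP, Bool.not_true, Bool.false_eq_true, if_false]
            rw [show pvCyc (cand :: t) (u + 1) = cand :: pvCyc (t ++ [cand]) u from rfl, hfc'] at hm
            exact hm)
        rw [if_neg (by simp only [hP, Bool.not_true]; exact Bool.false_ne_true), hrw, hcyc, hfc]
        simp only [Option.some.injEq, Prod.mk.injEq]
        refine ⟨trivial, by push_cast; ring⟩
      · -- cand picked
        have hPf : skip_set.contains cand = false := by simpa using hP
        have hfc : (cand :: pvCyc (t ++ [cand]) s).filter (fun m => !(skip_set.contains m))
            = cand :: (pvCyc (t ++ [cand]) s).filter (fun m => !(skip_set.contains m)) := by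
          simp only [List.filter_cons, hPf, Bool.not_false, if_true]
        have hrw := ih f (t ++ [cand]) (out ++ [cand]) (steps + 1) (by simp)
          (by omega) (by push_cast at hsg ⊢; omega)
          (by rw [hcyc, hfc] at hEq
              simp only [List.length_append, List.length_cons, List.length_nil] at hEq ⊢
              push_cast at hEq ⊢; omega)
          (fun u hu => by
            have hm := hmin (u + 1) (by omega)
            have hfc' : (cand :: pvCyc (t ++ [cand]) u).filter (fun m => !(skip_set.contains m))
                = cand :: (pvCyc (t ++ [cand]) u).filter (fun m => !(skip_set.contains m)) := by
              simp only [List.filter_cons, hPf, Bool.not_false, if_true]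
            rw [show pvCyc (cand :: t) (u + 1) = cand :: pvCyc (t ++ [cand]) u from rfl, hfc'] at hm
            simp only [List.length_append, List.length_cons, List.length_nil] at hm ⊢
            push_cast at hm ⊢; omega)
        rw [if_pos (by simp only [hPf, Bool.not_false]), hrw, hcyc, hfc]
        simp only [Option.some.injEq, Prod.mk.injEq]
        refine ⟨by simp, by push_cast; ring⟩

theorem pvPairs_map_snd (skip : List String) : ∀ (rot : List String) (s : Int),
    (((PySem.List.enumerate rot s).filter (fun p => !(skip.contains p.2))).map (fun p => p.2))
      = rot.filter (fun m => !(skip.contains m)) := by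
  intro rot
  induction rot with
  | nil => intro s; simp [PySem.List.enumerate_nil]
  | cons h t ih =>
    intro s
    rw [PySem.List.enumerate_cons]
    by_cases hP : skip.contains h
    · simp only [List.filter_cons, hP, Bool.not_true, Bool.false_eq_true, if_false]
      exact ih (s + 1)
    · have hPf : skip.contains h = false := by simpa using hP
      simp only [List.filter_cons, hPf, Bool.not_false, if_true, List.map_cons]
      rw [ih (s + 1)]

theorem pvPairs_idx (skip : List String) : ∀ (rot : List String) (s : Int) (j : Nat),
    j < ((PySem.List.enumerate rot s).filter (fun p => !(skip.contains p.2))).length →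
    ∃ d : Nat,
      ((((PySem.List.enumerate rot s).filter (fun p => !(skip.contains p.2))).getD j (0, "")).1 = s + d) ∧
      d < rot.length ∧
      ((rot.take (d + 1)).filter (fun m => !(skip.contains m))
          = (rot.filter (fun m => !(skip.contains m))).take (j + 1)) ∧
      (∀ b : Nat, b ≤ d → ((rot.take b).filter (fun m => !(skip.contains m))).length ≤ j) := by
  intro rot
  induction rot with
  | nil => intro s j hj; simp [PySem.List.enumerate_nil] at hj
  | cons h t ih =>
    intro s j hj
    rw [PySem.List.enumerate_cons] at hj ⊢
    by_cases hP : skip.contains h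
    · -- h skipped: not in pairs, filter drops it everywhere
      simp only [List.filter_cons, hP, Bool.not_true, Bool.false_eq_true, if_false] at hj ⊢
      obtain ⟨d, hd1, hd2, hd3, hd4⟩ := ih (s + 1) j hj
      refine ⟨d + 1, by rw [hd1]; push_cast; ring, by simp; omega, ?_, ?_⟩
      · show ((h :: t.take (d + 1)).filter _) = _
        simp only [List.filter_cons, hP, Bool.not_true, Bool.false_eq_true, if_false]
        exact hd3
      · intro b hb
        match b with
        | 0 => simp
        | b' + 1 =>
          show (((h :: t.take b').filter _)).length ≤ j
          simp only [List.filter_cons, hP, Bool.not_true, Bool.false_eq_true, if_false]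
          exact hd4 b' (by omega)
    · have hPf : skip.contains h = false := by simpa using hP
      simp only [List.filter_cons, hPf, Bool.not_false, if_true, List.length_cons] at hj ⊢
      match j with
      | 0 =>
        refine ⟨0, by rw [List.getD_cons_zero]; simp, by simp, ?_, ?_⟩
        · have hmem : h ∉ skip := by simpa using hP
          show ((h :: t.take 0).filter _) = _
          simp [hmem]
        · intro b hb
          have : b = 0 := by omega
          subst this; simp
      | j' + 1 =>
        obtain ⟨d, hd1, hd2, hd3, hd4⟩ := ih (s + 1) j' (by omega)
        refine ⟨d + 1, ?_, by simp; omega, ?_, ?_⟩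
        · show ((((PySem.List.enumerate t (s+1)).filter (fun p => !(skip.contains p.2))).getD j' (0, "")).1) = _
          rw [hd1]; push_cast; ring
        · show ((h :: t.take (d + 1)).filter _) = _
          simp only [List.filter_cons, hPf, Bool.not_false, if_true]
          rw [hd3]
          rfl
        · intro b hb
          match b with
          | 0 => simp
          | b' + 1 =>
            show (((h :: t.take b').filter _)).length ≤ j' + 1
            simp only [List.filter_cons, hPf, Bool.not_false, if_true, List.length_cons]
            have := hd4 b' (by omega)
            omega

theorem pvFilter_flatten_replicate (P : String → Bool) (l : List String) :
    ∀ a : Nat, ((List.replicate a l).flatten).filter P = (List.replicate a (l.filter P)).flatten := by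
  intro a
  induction a with
  | zero => simp
  | succ a ih => simp [List.replicate_succ, List.filter_append, ih]

theorem pvLen_flatten_replicate (l : List String) : ∀ a : Nat,
    ((List.replicate a l).flatten).length = a * l.length := by
  intro a
  induction a with
  | zero => simp
  | succ a ih => simp [List.replicate_succ, ih]; ring

-- ===== VERDICT (by name: the statement is the Claim_ definition above) =====
theorem next_assignees_spec : Claim_equal_next_assignees := by
  unfold Claim_equal_next_assignees
  intro team skip si n _ hPre
  unfold Spec_next_assignees
  by_cases hT : team = []
  · subst hT
    simp [next_assignees, next_assignees_alt]
  · have hLpos : 0 < team.length := by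
      cases team with
      | nil => exact absurd rfl hT
      | cons a l => simp
    have hL0 : (0:Int) < (team.length : Int) := by exact_mod_cast hLpos
    have hk0 : 0 ≤ PySem.Int.mod si (team.length : Int) := PySem.Int.mod_nonneg si hL0
    have hkL : PySem.Int.mod si (team.length : Int) < (team.length : Int) := PySem.Int.mod_lt si hL0
    set k : Int := PySem.Int.mod si (team.length : Int) with hkdef
    set kn : Nat := k.toNat with hkndef
    set rot : List String := team.drop kn ++ team.take kn with hrotdef
    have hknle : kn ≤ team.length := by omega
    have hrotlen : rot.length = team.length := by
      rw [hrotdef]; simp [List.length_append]; omega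
    have hrotne : rot ≠ [] := by
      intro hc
      rw [hc] at hrotlen
      simp at hrotlen
      omega
    set SG : Int := max 10000 (5 * ((team.length : Int) + n)) with hSGdef
    have hSGpos : (10000:Int) ≤ SG := le_max_left _ _
    by_cases hn : n ≤ 0
    · -- n ≤ 0: the loop body never runs
      have hloop : pvLoopA skip n SG (SG+1).toNat rot [] 0 = some ([], 0) := by
        rw [pvLoopA.eq_def]
        show (if ((([]:List String)).length : Int) < n then _ else some (([]:List String), (0:Int))) = _
        rw [if_neg (by simp; omega)]
      have hA : next_assignees team skip si n = ([], PySem.Int.mod (si + 0) (team.length:Int)) := by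
        unfold next_assignees
        rw [if_neg hT]
        show (match pvLoopA skip n SG (SG+1).toNat rot [] 0 with
              | some (out, steps) => (out, PySem.Int.mod (si + steps) (team.length:Int))
              | none => ([], si)) = _
        rw [hloop]
      rw [hA]
      unfold next_assignees_alt
      rw [if_neg (by omega : ¬ ((team.length:Int) = 0)), if_pos hn]
      rw [add_zero, ← hkdef]
    · rw [not_le] at hn
      rcases hPre with h | h | ⟨hv, hsteps⟩
      · exact absurd h hT
      · omega
      · set pairs : List (Int × String) :=
          (PySem.List.enumerate rot 0).filter (fun p => !(skip.contains p.2)) with hpairsdef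
        have hmap : pairs.map (fun p => p.2) = rot.filter (fun m => !(skip.contains m)) :=
          pvPairs_map_snd skip rot 0
        have hvrot : (rot.filter (fun m => !(skip.contains m))).length = pairs.length := by
          rw [← hmap]; simp
        have hvteam : pairs.length = pvValidCount team skip := by
          unfold pvValidCount
          rw [← hvrot, hrotdef]
          conv_rhs => rw [← List.take_append_drop kn team]
          simp only [List.filter_append, List.length_append]
          omega
        have hvpos : 0 < pairs.length := by rw [hvteam]; exact hv
        set m : Nat := (n-1).toNat with hmdef
        have hmn : (m : Int) = n - 1 := by omega
        have hq : PySem.Int.floordiv (n-1) (pairs.length:Int) = ((m / pairs.length : Nat) : Int) := by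
          rw [← hmn]; exact PySem.Int.floordiv_natCast m pairs.length
        have hr : PySem.Int.mod (n-1) (pairs.length:Int) = ((m % pairs.length : Nat) : Int) := by
          rw [← hmn]; exact PySem.Int.mod_natCast m pairs.length
        have hjv : m % pairs.length < pairs.length := Nat.mod_lt _ hvpos
        obtain ⟨d, hd1, hd2, hd3, hd4⟩ := pvPairs_idx skip rot 0 (m % pairs.length) (by rw [← hpairsdef]; exact hjv)
        rw [← hpairsdef] at hd1
        have hd1' : (pairs.getD (m % pairs.length) (0,"")).1 = (d:Int) := by rw [hd1]; ring
        set sstar : Nat := (m / pairs.length) * team.length + (d + 1) with hsdef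
        have hStepsB : pvStepsB team skip si n = (sstar : Int) := by
          show PySem.Int.floordiv (n-1) (pairs.length:Int) * (team.length:Int)
              + (PySem.List.pyGetD pairs (PySem.Int.mod (n-1) (pairs.length:Int)) (0,"")).1 + 1 = (sstar:Int)
          rw [hq, hr, PySem.List.pyGetD_natCast, hd1']
          rw [hsdef]
          push_cast
          ring
        rw [hStepsB, ← hSGdef] at hsteps
        -- the count of valid members in the first sstar cyclic elements is exactly n
        have hcycS : pvCyc rot sstar = (List.replicate (m/pairs.length) rot).flatten ++ rot.take (d+1) := by
          have h1 := pvCyc_cycles rot (m/pairs.length) (d+1) (by omega)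
          rw [hrotlen] at h1
          rw [hsdef, h1]
        have hfiltS : (pvCyc rot sstar).filter (fun mm => !(skip.contains mm))
            = (List.replicate (m/pairs.length) (rot.filter (fun mm => !(skip.contains mm)))).flatten
              ++ (rot.filter (fun mm => !(skip.contains mm))).take (m % pairs.length + 1) := by
          rw [hcycS, List.filter_append, pvFilter_flatten_replicate, hd3]
        have hlenS : ((pvCyc rot sstar).filter (fun mm => !(skip.contains mm))).length = m + 1 := by
          rw [hfiltS]
          simp only [List.length_append, pvLen_flatten_replicate, hvrot, List.length_take]
          have h2 : min (m % pairs.length + 1) pairs.length = m % pairs.length + 1 := by omega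
          rw [h2]
          have h3 := Nat.div_add_mod' m pairs.length
          omega
        have hminT : ∀ t : Nat, t < sstar →
            (((pvCyc rot t).filter (fun mm => !(skip.contains mm))).length : Int) < n := by
          intro t ht
          have hbl : t % rot.length < rot.length := Nat.mod_lt _ (by omega)
          have hdecomp : pvCyc rot t
              = (List.replicate (t / rot.length) rot).flatten ++ rot.take (t % rot.length) := by
            have h1 := pvCyc_cycles rot (t / rot.length) (t % rot.length) (le_of_lt hbl)
            rw [Nat.div_add_mod'] at h1
            exact h1
          have hlen_t : ((pvCyc rot t).filter (fun mm => !(skip.contains mm))).length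
              = (t / rot.length) * pairs.length + ((rot.take (t % rot.length)).filter (fun mm => !(skip.contains mm))).length := by
            rw [hdecomp, List.filter_append, pvFilter_flatten_replicate]
            simp only [List.length_append, pvLen_flatten_replicate, hvrot]
          have hcb_le_v : ((rot.take (t % rot.length)).filter (fun mm => !(skip.contains mm))).length ≤ pairs.length := by
            rw [← hvrot]
            exact List.Sublist.length_le (List.Sublist.filter _ (List.take_sublist _ rot))
          have hale : t / rot.length ≤ m / pairs.length := by
            have h1 : t < (m / pairs.length + 1) * rot.length := by
              calc t < sstar := ht
                _ = (m/pairs.length) * rot.length + (d + 1) := by rw [hsdef, ← hrotlen]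
                _ ≤ (m/pairs.length) * rot.length + rot.length := by omega
                _ = (m/pairs.length + 1) * rot.length := by ring
            have h2 : t / rot.length < m / pairs.length + 1 := Nat.div_lt_of_lt_mul (by rw [mul_comm] at h1; exact h1)
            omega
          have hcount_le : ((pvCyc rot t).filter (fun mm => !(skip.contains mm))).length ≤ m := by
            rcases Nat.lt_or_ge (t / rot.length) (m / pairs.length) with hlt | hge
            · have h2 : (t / rot.length + 1) * pairs.length ≤ (m/pairs.length) * pairs.length := Nat.mul_le_mul_right pairs.length (by omega)
              have h3 : (m/pairs.length) * pairs.length ≤ m := Nat.div_mul_le_self m pairs.length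
              rw [hlen_t]
              have h4 : (t / rot.length) * pairs.length + pairs.length = (t / rot.length + 1) * pairs.length := by ring
              omega
            · have haeq : t / rot.length = m / pairs.length := by omega
              have hab : rot.length * (t / rot.length) + t % rot.length = t := Nat.div_add_mod t rot.length
              have hblt : t % rot.length ≤ d := by
                have h1 : t < (m/pairs.length) * rot.length + (d + 1) := by rw [hsdef, ← hrotlen] at ht; exact ht
                rw [haeq] at hab
                rw [mul_comm] at hab
                omega
              have h5 := hd4 (t % rot.length) hblt
              have h6 : pairs.length * (m / pairs.length) + m % pairs.length = m := Nat.div_add_mod m pairs.length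
              rw [hlen_t, haeq]
              rw [mul_comm] at h6
              omega
          omega
        have hloop := pvLoop_spec skip n SG sstar (SG+1).toNat rot [] 0 hrotne
          (by omega)
          (by omega)
          (by simp only [List.length_nil, Nat.cast_zero, zero_add, hlenS]; omega)
          (fun t ht => by
            simp only [List.length_nil, Nat.cast_zero, zero_add]
            exact hminT t ht)
        simp only [List.nil_append, zero_add] at hloop
        have hA : next_assignees team skip si n
            = ((pvCyc rot sstar).filter (fun mm => !(skip.contains mm)),
               PySem.Int.mod (si + (sstar:Int)) (team.length:Int)) := by
          unfold next_assignees
          rw [if_neg hT]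
          show (match pvLoopA skip n SG (SG+1).toNat rot [] 0 with
                | some (out, steps) => (out, PySem.Int.mod (si + steps) (team.length:Int))
                | none => ([], si)) = _
          rw [hloop]
        have hB : next_assignees_alt team skip si n
            = ((List.replicate (m/pairs.length) (rot.filter (fun mm => !(skip.contains mm)))).flatten
                 ++ (rot.filter (fun mm => !(skip.contains mm))).take (m % pairs.length + 1),
               PySem.Int.mod (k + (sstar:Int)) (team.length:Int)) := by
          show (if (team.length:Int) = 0 then ([], si)
                else if n ≤ 0 then ([], k)
                else if (pairs.length:Int) = 0 then ([], k)
                else ((List.replicate (PySem.Int.floordiv (n-1) (pairs.length:Int)).toNat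
                        (pairs.map (fun p => p.2))).flatten
                      ++ (pairs.map (fun p => p.2)).take ((PySem.Int.mod (n-1) (pairs.length:Int)).toNat + 1),
                      PySem.Int.mod (k + (PySem.Int.floordiv (n-1) (pairs.length:Int) * (team.length:Int)
                        + (PySem.List.pyGetD pairs (PySem.Int.mod (n-1) (pairs.length:Int)) (0,"")).1 + 1)) (team.length:Int))) = _
          rw [if_neg (by omega : ¬ ((team.length:Int) = 0)), if_neg (by omega : ¬ (n ≤ 0)),
              if_neg (by omega : ¬ ((pairs.length:Int) = 0))]
          rw [hq, hr, PySem.List.pyGetD_natCast, hd1', hmap]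
          have ht1 : ((m / pairs.length : Nat) : Int).toNat = m / pairs.length := Int.toNat_natCast _
          have ht2 : ((m % pairs.length : Nat) : Int).toNat = m % pairs.length := Int.toNat_natCast _
          rw [ht1, ht2]
          have ht3 : ((m / pairs.length : Nat) : Int) * (team.length:Int) + (d:Int) + 1 = (sstar : Int) := by
            rw [hsdef]; push_cast; ring
          rw [ht3]
        rw [hA, hB, hfiltS]
        have hmodeq : PySem.Int.mod (si + (sstar:Int)) (team.length:Int)
            = PySem.Int.mod (k + (sstar:Int)) (team.length:Int) := by
          rw [PySem.Int.mod_eq_emod_of_pos hL0, PySem.Int.mod_eq_emod_of_pos hL0,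
              hkdef, PySem.Int.mod_eq_emod_of_pos hL0]
          conv_lhs => rw [Int.add_emod]
          conv_rhs => rw [Int.add_emod]
          rw [Int.emod_emod_of_dvd _ dvd_rfl]
        rw [hmodeq]
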